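-- pv_equiv track=rewrite | github.com/y2y688/kovdatak | pykovdatak/app/parser.py | _is_kill_event_row
-- ===== SOURCE A (Python) =====
-- from typing import Any, Dict, List, Tuple
--
-- def _is_int(s: str) -> bool:
--     try:
--         int(s.strip())
--         return True
--     except Exception:
--         return False
--
-- def _is_kill_event_row(rec: List[str]) -> bool:
--     if len(rec) < 2:
--         return False
--     if not _is_int(rec[0]):
--         return False
--     s = rec[1].strip()
--     if len(s) < 8:
--         return False
--     if not (s[2] == ":" and s[5] == ":"):
--         return False
--     for ch in (s[0], s[1], s[3], s[4], s[6], s[7]):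
--         if ch < "0" or ch > "9":
--             return False
--     return True
-- ===== SOURCE B (Python) =====
-- from typing import List
--
-- def _is_int(s: str) -> bool:
--     try:
--         int(s.strip())
--         return True
--     except Exception:
--         return False
--
-- def _has_time_prefix(s: str, groups: int) -> bool:
--     # recursive descent: a group is two ASCII digits; groups are joined by ':'
--     if len(s) < 2 or not ('0' <= s[0] <= '9' and '0' <= s[1] <= '9'):
--         return False
--     if groups == 1:
--         return True
--     return len(s) >= 3 and s[2] == ':' and _has_time_prefix(s[3:], groups - 1)
--
-- def _is_kill_event_row(rec: List[str]) -> bool: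
--     if len(rec) < 2 or not _is_int(rec[0]):
--         return False
--     return _has_time_prefix(rec[1].strip(), 3)
-- ===== Notes on version B (the rewrite author's own statement) =====
-- stated objective: alternative
-- what changed: Replaced A's fixed positional checks (two ':' tests at indices 2 and 5 plus a loop over six hand-picked digit indices) with a recursive-descent parser that consumes the stripped string group by group: two digits, then ':' and recurse, for a generic group count of 3.
import Mathlib
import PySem

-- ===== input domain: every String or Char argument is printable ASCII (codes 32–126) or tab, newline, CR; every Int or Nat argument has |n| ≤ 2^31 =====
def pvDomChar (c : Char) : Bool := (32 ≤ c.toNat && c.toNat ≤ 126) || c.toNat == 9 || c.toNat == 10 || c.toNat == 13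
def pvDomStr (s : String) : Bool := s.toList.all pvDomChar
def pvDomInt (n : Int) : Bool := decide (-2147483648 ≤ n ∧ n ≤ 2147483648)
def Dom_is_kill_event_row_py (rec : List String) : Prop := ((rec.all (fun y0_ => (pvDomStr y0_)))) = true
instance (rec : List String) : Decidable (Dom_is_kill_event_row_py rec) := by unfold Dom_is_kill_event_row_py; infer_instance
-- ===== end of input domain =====

-- B replaces A's fixed positional checks (':' at indices 2 and 5, six hand-picked digit
-- indices) with a recursive-descent parser consuming the string group by group (alternative).

-- ===== PORT A =====
-- helper _is_int: int(s.strip()) succeeds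
def pv_is_int (s : String) : Bool := (PySem.Int.ofStr? (PySem.Str.strip s)).isSome

def is_kill_event_row_py (rec : List String) : Bool :=
  if rec.length < 2 then false
  else
    -- rec[0], rec[1]: in range because of the length guard
    let r0 := (PySem.List.pyGet? rec 0).getD ""
    let r1 := (PySem.List.pyGet? rec 1).getD ""
    if !(pv_is_int r0) then false
    else
      let s := (PySem.Str.strip r1).toList
      if s.length < 8 then false
      else if !((s.getD 2 ' ' == ':') && (s.getD 5 ' ' == ':')) then false
      else
        -- for ch in (s[0], s[1], s[3], s[4], s[6], s[7]): if ch < "0" or ch > "9": return False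
        [s.getD 0 ' ', s.getD 1 ' ', s.getD 3 ' ', s.getD 4 ' ', s.getD 6 ' ', s.getD 7 ' '].all
          (fun ch => !(decide (ch < '0') || decide ('9' < ch)))

-- ===== PORT B =====
-- helper _has_time_prefix: recursive descent — two ASCII digits, then ':' and recurse
def pv_has_time_prefix (s : List Char) (groups : Int) : Bool :=
  match s with
  | c0 :: c1 :: rest =>
      if !((decide ('0' ≤ c0) && decide (c0 ≤ '9')) && (decide ('0' ≤ c1) && decide (c1 ≤ '9'))) then
        false
      else if groups == 1 then true
      else
        -- len(s) >= 3 and s[2] == ':' and _has_time_prefix(s[3:], groups - 1)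
        match rest with
        | c2 :: rest' => (c2 == ':') && pv_has_time_prefix rest' (groups - 1)
        | [] => false
  | _ => false   -- len(s) < 2

def is_kill_event_row_py_alt (rec : List String) : Bool :=
  match rec with
  | r0 :: r1 :: _ =>
      if !(pv_is_int r0) then false
      else pv_has_time_prefix (PySem.Str.strip r1).toList 3
  | _ => false   -- len(rec) < 2

-- ===== PRECONDITION & SPEC =====
def Spec_is_kill_event_row_py (rec : List String) (out : Bool) : Prop := out = is_kill_event_row_py_alt rec
instance (rec : List String) (out : Bool) : Decidable (Spec_is_kill_event_row_py rec out) := by unfold Spec_is_kill_event_row_py; infer_instance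

-- ===== CLAIM (what is proved, stated in full; the proofs are below) =====
def Claim_equal_is_kill_event_row_py : Prop := ∀ (rec : List String), Dom_is_kill_event_row_py rec → Spec_is_kill_event_row_py rec (is_kill_event_row_py rec)

-- ===== LEMMAS AND PROOFS =====

-- unfolding the parser at one group for symbolic characters
theorem pv_htp_one (c0 c1 : Char) (rest : List Char) :
    pv_has_time_prefix (c0 :: c1 :: rest) 1
      = ((decide ('0' ≤ c0) && decide (c0 ≤ '9')) && (decide ('0' ≤ c1) && decide (c1 ≤ '9'))) := by
  unfold pv_has_time_prefix
  cases hg : ((decide ('0' ≤ c0) && decide (c0 ≤ '9')) && (decide ('0' ≤ c1) && decide (c1 ≤ '9'))) <;>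
    simp_all

-- the post-strip checks agree for every character list
set_option maxHeartbeats 1000000 in
theorem pv_core_eq (s : List Char) :
    (if s.length < 8 then false
     else if !((s.getD 2 ' ' == ':') && (s.getD 5 ' ' == ':')) then false
     else [s.getD 0 ' ', s.getD 1 ' ', s.getD 3 ' ', s.getD 4 ' ', s.getD 6 ' ', s.getD 7 ' '].all
            (fun ch => !(decide (ch < '0') || decide ('9' < ch))))
    = pv_has_time_prefix s 3 := by
  rcases s with _ | ⟨c0, _ | ⟨c1, _ | ⟨c2, _ | ⟨c3, _ | ⟨c4, _ | ⟨c5, _ | ⟨c6, _ | ⟨c7, rest⟩⟩⟩⟩⟩⟩⟩⟩ <;>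
    simp [pv_has_time_prefix, List.all]
  rw [Bool.eq_iff_iff]
  simp [pv_htp_one, not_lt]
  tauto

-- ===== VERDICT (by name: the statement is the Claim_ definition above) =====
theorem is_kill_event_row_py_spec : Claim_equal_is_kill_event_row_py := by
  intro rec _
  show is_kill_event_row_py rec = is_kill_event_row_py_alt rec
  match rec with
  | [] => rfl
  | [r0] => rfl
  | r0 :: r1 :: rest =>
    have hpos : (0:Int) ≤ (rest.length:Int) + 1 := by positivity
    have h0 : (PySem.List.pyGet? (r0 :: r1 :: rest) 0).getD "" = r0 := by
      simp [PySem.List.pyGet?, PySem.List.pyIdx?, hpos]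
    have h1 : (PySem.List.pyGet? (r0 :: r1 :: rest) 1).getD "" = r1 := by
      simp [PySem.List.pyGet?, PySem.List.pyIdx?]
    simp only [is_kill_event_row_py, is_kill_event_row_py_alt, h0, h1]
    rw [if_neg (by simp)]
    cases h : pv_is_int r0
    · simp
    · simpa [h] using pv_core_eq ((PySem.Str.strip r1).toList)
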